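-- pv_equiv track=rewrite | github.com/duckgeunpark/IWT | back/app/services/llm_pipeline.py | _inject_table
-- ===== SOURCE A (Python) =====
-- from typing import Any, Dict, List, Optional, Tuple
--
-- def _inject_table(markdown: str, itinerary_table: str) -> str:
--     """Stage 3 출력에 일정 표 강제 삽입 (LLM 생성 표 제거 후 첫 ## 앞에 삽입)"""
--     if not itinerary_table:
--         return markdown
--
--     lines = markdown.split("\n")
--     cleaned: List[str] = []
--     i = 0
--     while i < len(lines):
--         if lines[i].strip().startswith("|"):
--             while i < len(lines) and lines[i].strip().startswith("|"):
--                 i += 1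
--         else:
--             cleaned.append(lines[i])
--             i += 1
--
--     insert_at = len(cleaned)
--     for idx, line in enumerate(cleaned):
--         if line.startswith("##"):
--             insert_at = idx
--             break
--
--     cleaned.insert(insert_at, "")
--     cleaned.insert(insert_at + 1, itinerary_table)
--     cleaned.insert(insert_at + 2, "")
--     return "\n".join(cleaned)
-- ===== SOURCE B (Python) =====
-- def _inject_table(markdown: str, itinerary_table: str) -> str:
--     """Single linear pass: drop table lines; inject itinerary before first ## heading (or at end)."""
--     if not itinerary_table:
--         return markdown
--     out = []
--     inserted = False
--     for line in markdown.split("\n"):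
--         if line.strip().startswith("|"):
--             continue
--         if not inserted and line.startswith("##"):
--             out.extend(["", itinerary_table, "", line])
--             inserted = True
--         else:
--             out.append(line)
--     if not inserted:
--         out.extend(["", itinerary_table, ""])
--     return "\n".join(out)
-- ===== Notes on version B (the rewrite author's own statement) =====
-- stated objective: simpler
-- what changed: A's two sequential passes (a while-loop that strips table lines, then an enumerate-loop locating the first '##' heading followed by three list.insert calls) are fused into one linear pass over the lines with an 'inserted' flag that splices '', table, '' in front of the first kept heading line, or appends them at the end if no heading was seen.
import Mathlib
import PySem

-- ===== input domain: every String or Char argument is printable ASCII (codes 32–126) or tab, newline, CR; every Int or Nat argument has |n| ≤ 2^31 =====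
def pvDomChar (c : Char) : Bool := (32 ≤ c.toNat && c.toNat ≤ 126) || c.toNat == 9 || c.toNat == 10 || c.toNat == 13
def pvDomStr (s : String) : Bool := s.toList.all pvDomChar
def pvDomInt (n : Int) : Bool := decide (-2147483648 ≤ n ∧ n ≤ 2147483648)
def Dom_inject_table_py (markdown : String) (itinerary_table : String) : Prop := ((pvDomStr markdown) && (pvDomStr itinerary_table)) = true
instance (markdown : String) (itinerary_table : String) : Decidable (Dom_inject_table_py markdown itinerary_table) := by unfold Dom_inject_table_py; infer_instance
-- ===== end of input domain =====

-- B replaces A's two passes (clean, then find-and-insert) by one linear pass with an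
-- `inserted` flag (objective: simpler decomposition; same asymptotic cost).

-- ===== PORT A =====
-- line.strip().startswith("|")
def pvIsBar (l : String) : Bool := PySem.Str.startswith (PySem.Str.strip l) "|"

-- the outer while loop with the inner bar-skipping while loop
def pvCleanA : List String → List String
  | [] => []
  | l :: rest =>
      if pvIsBar l then pvCleanA (rest.dropWhile pvIsBar)
      else l :: pvCleanA rest
  termination_by ls => ls.length
  decreasing_by
    · exact Nat.lt_succ_of_le (List.length_dropWhile_le _ _)
    · simp

-- the for/enumerate loop computing insert_at (defaults to len(cleaned))
def pvFindA : List String → Nat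
  | [] => 0
  | l :: rest => if PySem.Str.startswith l "##" then 0 else pvFindA rest + 1

def inject_table_py (markdown : String) (itinerary_table : String) : String :=
  if itinerary_table = "" then markdown
  else
    let lines := (PySem.Str.split? markdown "\n").getD []  -- sep "\n" ≠ "", so split? is always some
    let cleaned := pvCleanA lines
    let insert_at := pvFindA cleaned
    let c1 := PySem.List.insert cleaned (insert_at : Int) ""
    let c2 := PySem.List.insert c1 ((insert_at : Int) + 1) itinerary_table
    let c3 := PySem.List.insert c2 ((insert_at : Int) + 2) ""
    PySem.Str.join "\n" c3

-- ===== PORT B =====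
-- the single for-loop of Source B, with the `inserted` flag as a parameter;
-- the trailing `if not inserted: out.extend(...)` is the `[], false` base case
def pvGoB (tbl : String) : List String → Bool → List String
  | [], ins => if ins then [] else ["", tbl, ""]
  | l :: rest, ins =>
      if pvIsBar l then pvGoB tbl rest ins
      else if !ins && PySem.Str.startswith l "##" then
        "" :: tbl :: "" :: l :: pvGoB tbl rest true
      else l :: pvGoB tbl rest ins

def inject_table_py_alt (markdown : String) (itinerary_table : String) : String :=
  if itinerary_table = "" then markdown
  else
    -- sep "\n" ≠ "", so split? is always some
    PySem.Str.join "\n" (pvGoB itinerary_table ((PySem.Str.split? markdown "\n").getD []) false)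

-- ===== PRECONDITION & SPEC =====
def Spec_inject_table_py (markdown : String) (itinerary_table : String) (out : String) : Prop := out = inject_table_py_alt markdown itinerary_table
instance (markdown : String) (itinerary_table : String) (out : String) : Decidable (Spec_inject_table_py markdown itinerary_table out) := by unfold Spec_inject_table_py; infer_instance

-- ===== CLAIM (what is proved, stated in full; the proofs are below) =====
def Claim_equal_inject_table_py : Prop := ∀ (markdown : String) (itinerary_table : String), Dom_inject_table_py markdown itinerary_table → Spec_inject_table_py markdown itinerary_table (inject_table_py markdown itinerary_table)

-- ===== LEMMAS AND PROOFS =====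

theorem pvFilter_dropWhile (ls : List String) :
    (ls.dropWhile pvIsBar).filter (fun l => !pvIsBar l) = ls.filter (fun l => !pvIsBar l) := by
  induction ls with
  | nil => rfl
  | cons l rest ih =>
      by_cases h : pvIsBar l <;> simp [List.dropWhile_cons, List.filter_cons, h, ih]

theorem pvCleanA_eq_filter (ls : List String) :
    pvCleanA ls = ls.filter (fun l => !pvIsBar l) := by
  induction ls using pvCleanA.induct with
  | case1 => simp [pvCleanA]
  | case2 l rest h ih =>
      rw [pvCleanA]; simp only [h, if_true]
      rw [ih, pvFilter_dropWhile, List.filter_cons, h]; simp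
  | case3 l rest h ih =>
      rw [pvCleanA]; simp only [h, if_false]
      rw [ih, List.filter_cons]; simp [h]

theorem pvFindA_le (c : List String) : pvFindA c ≤ c.length := by
  induction c with
  | nil => simp [pvFindA]
  | cons l rest ih =>
      rw [pvFindA]; split <;> simp <;> omega

-- pure-list form of the three consecutive inserts
theorem pvTakeDrop3 (tbl : String) (c : List String) (n : Nat) (h : n ≤ c.length) :
    let f := fun (xs : List String) (k : Nat) (v : String) => xs.take k ++ v :: xs.drop k
    f (f (f c n "") (n + 1) tbl) (n + 2) "" = c.take n ++ "" :: tbl :: "" :: c.drop n := by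
  induction n generalizing c with
  | zero => simp
  | succ m ih =>
      cases c with
      | nil => simp at h
      | cons a c' =>
          simp only [List.take_succ_cons, List.drop_succ_cons, List.cons_append]
          have := ih c' (by simpa using h)
          simpa using congrArg (fun xs => a :: xs) this

theorem pvInsertChain (tbl : String) (c : List String) (n : Nat) (h : n ≤ c.length) :
    PySem.List.insert (PySem.List.insert (PySem.List.insert c (n : Int) "")
        ((n : Int) + 1) tbl) ((n : Int) + 2) "" =
      c.take n ++ "" :: tbl :: "" :: c.drop n := by
  rw [PySem.List.insert_natCast c n "" h]
  have h1 : n + 1 ≤ (c.take n ++ "" :: c.drop n).length := by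
    simp; omega
  have e1 : ((n : Int) + 1) = ((n + 1 : Nat) : Int) := by push_cast; ring
  rw [e1, PySem.List.insert_natCast _ (n + 1) tbl h1]
  have h2 : n + 2 ≤ ((c.take n ++ "" :: c.drop n).take (n+1) ++ tbl :: (c.take n ++ "" :: c.drop n).drop (n+1)).length := by
    simp; omega
  have e2 : ((n : Int) + 2) = ((n + 2 : Nat) : Int) := by push_cast; ring
  rw [e2, PySem.List.insert_natCast _ (n + 2) "" h2]
  exact pvTakeDrop3 tbl c n h

-- B in the inserted state just filters out bar lines
theorem pvGoB_true (tbl : String) (ls : List String) :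
    pvGoB tbl ls true = ls.filter (fun l => !pvIsBar l) := by
  induction ls with
  | nil => rfl
  | cons l rest ih =>
      rw [pvGoB]; by_cases h : pvIsBar l <;> simp [h, ih, List.filter_cons]

-- B's single pass computes exactly "filter, then splice before the first heading"
theorem pvGoB_false (tbl : String) (ls : List String) :
    pvGoB tbl ls false =
      (ls.filter (fun l => !pvIsBar l)).take (pvFindA (ls.filter (fun l => !pvIsBar l))) ++
        "" :: tbl :: "" :: (ls.filter (fun l => !pvIsBar l)).drop (pvFindA (ls.filter (fun l => !pvIsBar l))) := by
  induction ls with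
  | nil => rfl
  | cons l rest ih =>
      rw [pvGoB]
      by_cases hb : pvIsBar l
      · simp [hb, ih]
      · by_cases hh : PySem.Str.startswith l "##"
        · have hc : PySem.Chars.startswith l.toList ['#', '#'] = true := by simpa using hh
          simp [hb, hh, hc, pvGoB_true, pvFindA]
        · have hc : PySem.Chars.startswith l.toList ['#', '#'] = false := by
            simpa using hh
          simp [hb, hh, hc, pvFindA, ih]

theorem inject_table_py_spec' (markdown itinerary_table : String) :
    inject_table_py markdown itinerary_table = inject_table_py_alt markdown itinerary_table := by
  unfold inject_table_py inject_table_py_alt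
  by_cases he : itinerary_table = ""
  · simp [he]
  · simp only [he, if_false]
    rw [pvCleanA_eq_filter, pvInsertChain _ _ _ (pvFindA_le _), pvGoB_false]

-- ===== VERDICT (by name: the statement is the Claim_ definition above) =====
theorem inject_table_py_spec : Claim_equal_inject_table_py := by
  intro markdown itinerary_table _
  exact inject_table_py_spec' markdown itinerary_table
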